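-- pv_equiv track=rewrite | github.com/ffaltings/InteractiveTextGeneration | infosol/alignment.py | get_correct_canvas_positions
-- ===== SOURCE A (Python) =====
-- def get_correct_canvas_positions(alignment):
--     correct_positions = []
--     idx = 0
--     for p in alignment:
--         if p[0] == '': continue
--         if p[0] == p[1]: correct_positions.append(idx)
--         idx += 1
--     return correct_positions
-- ===== SOURCE B (Python) =====
-- def get_correct_canvas_positions(alignment):
--     idx = sum(1 for p in alignment if p[0] != '')
--     out = []
--     for p in reversed(alignment):
--         if p[0] == '':
--             continue
--         idx -= 1
--         if p[0] == p[1]: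
--             out.append(idx)
--     out.reverse()
--     return out
-- ===== Notes on version B (the rewrite author's own statement) =====
-- stated objective: alternative
-- what changed: Builds the result back-to-front: precomputes the number of non-empty pairs, then scans the list in reverse with a decrementing index collecting matches, and reverses the collected list at the end (vs A's forward scan with an incrementing counter).
import Mathlib
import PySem

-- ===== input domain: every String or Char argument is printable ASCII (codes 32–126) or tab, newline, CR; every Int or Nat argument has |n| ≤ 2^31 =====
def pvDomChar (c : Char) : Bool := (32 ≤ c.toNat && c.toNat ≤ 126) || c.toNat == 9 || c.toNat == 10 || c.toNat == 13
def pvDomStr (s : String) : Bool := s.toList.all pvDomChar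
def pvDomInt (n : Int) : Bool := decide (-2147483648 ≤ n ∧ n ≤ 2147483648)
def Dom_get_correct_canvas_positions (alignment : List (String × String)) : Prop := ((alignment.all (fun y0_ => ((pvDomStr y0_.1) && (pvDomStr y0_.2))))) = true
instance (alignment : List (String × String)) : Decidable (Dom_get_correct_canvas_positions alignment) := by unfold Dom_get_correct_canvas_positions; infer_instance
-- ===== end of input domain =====

-- B builds the result back-to-front: precount the non-empty pairs, scan in reverse with a decrementing index, reverse the collected matches (alternative decomposition, same cost).


-- ===== PORT A =====
-- loop state: (correct_positions, idx)
def get_correct_canvas_positions (alignment : List (String × String)) : List Int :=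
  (alignment.foldl (fun (st : List Int × Int) p =>
      if p.1 == "" then st
      else if p.1 == p.2 then (st.1 ++ [st.2], st.2 + 1)
      else (st.1, st.2 + 1)) ([], 0)).1

-- ===== PORT B =====
-- B: count non-empty pairs, reverse scan with a decrementing index, reverse the output
def get_correct_canvas_positions_alt (alignment : List (String × String)) : List Int :=
  let idx0 : Int := alignment.foldl (fun a p => if p.1 == "" then a else a + 1) 0
  let fin := alignment.reverse.foldl (fun (st : Int × List Int) p =>
      if p.1 == "" then st
      else
        let i := st.1 - 1
        if p.1 == p.2 then (i, st.2 ++ [i]) else (i, st.2)) (idx0, [])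
  fin.2.reverse

-- ===== PRECONDITION & SPEC =====
def Spec_get_correct_canvas_positions (alignment : List (String × String)) (out : List Int) : Prop := out = get_correct_canvas_positions_alt alignment
instance (alignment : List (String × String)) (out : List Int) : Decidable (Spec_get_correct_canvas_positions alignment out) := by unfold Spec_get_correct_canvas_positions; infer_instance

-- ===== CLAIM (what is proved, stated in full; the proofs are below) =====
def Claim_equal_get_correct_canvas_positions : Prop := ∀ (alignment : List (String × String)), Dom_get_correct_canvas_positions alignment → Spec_get_correct_canvas_positions alignment (get_correct_canvas_positions alignment)

-- ===== LEMMAS AND PROOFS =====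

-- ===== VERDICT (by name: the statement is the Claim_ definition above) =====
-- proof helpers: G l c = the match indices of l with base offset c; cntG = number of non-empty pairs
def gccpG : List (String × String) → Int → List Int
  | [], _ => []
  | p :: t, c =>
    if p.1 == "" then gccpG t c
    else (if p.1 == p.2 then [c] else []) ++ gccpG t (c + 1)

def gccpCnt : List (String × String) → Int
  | [] => 0
  | p :: t => (if p.1 == "" then 0 else 1) + gccpCnt t

theorem gccp_A_loop (l : List (String × String)) (acc : List Int) (i : Int) :
    (l.foldl (fun (st : List Int × Int) p =>
      if p.1 == "" then st
      else if p.1 == p.2 then (st.1 ++ [st.2], st.2 + 1)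
      else (st.1, st.2 + 1)) (acc, i)).1 = acc ++ gccpG l i := by
  induction l generalizing acc i with
  | nil => simp [gccpG]
  | cons p l ih =>
    by_cases h1 : p.1 == ""
    · rw [List.foldl_cons, if_pos h1, ih]; simp [gccpG, h1]
    · by_cases h2 : p.1 == p.2
      · rw [List.foldl_cons, if_neg h1, if_pos h2, ih]; simp [gccpG, h1, h2]
      · rw [List.foldl_cons, if_neg h1, if_neg h2, ih]; simp [gccpG, h1, h2]

theorem gccp_cnt_fold (l : List (String × String)) (b : Int) :
    l.foldl (fun a p => if p.1 == "" then a else a + 1) b = b + gccpCnt l := by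
  induction l generalizing b with
  | nil => simp [gccpCnt]
  | cons p l ih =>
    by_cases h1 : p.1 = ""
    · simp only [List.foldl_cons, beq_iff_eq, if_pos h1]
      simpa [gccpCnt, h1] using ih b
    · simp only [List.foldl_cons, beq_iff_eq, if_neg h1]
      have h := ih (b + 1)
      simp only [beq_iff_eq] at h
      rw [h]
      simp [gccpCnt, h1]; ring

theorem gccp_B_loop (l : List (String × String)) (c : Int) (out : List Int) :
    l.reverse.foldl (fun (st : Int × List Int) p =>
      if p.1 == "" then st
      else
        let i := st.1 - 1
        if p.1 == p.2 then (i, st.2 ++ [i]) else (i, st.2)) (c + gccpCnt l, out)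
    = (c, out ++ (gccpG l c).reverse) := by
  induction l generalizing c out with
  | nil => simp [gccpCnt, gccpG]
  | cons p l ih =>
    rw [List.reverse_cons, List.foldl_append]
    by_cases h1 : p.1 = ""
    · have : c + gccpCnt (p :: l) = c + gccpCnt l := by simp [gccpCnt, h1]
      rw [this, ih]
      simp [gccpG, h1]
    · have : c + gccpCnt (p :: l) = (c + 1) + gccpCnt l := by simp [gccpCnt, h1]; ring
      rw [this, ih]
      by_cases h2 : p.1 = p.2
      · have h1' : ¬ p.2 = "" := by rw [← h2]; exact h1
        simp [gccpG, h2, h1']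
      · simp [gccpG, h1, h2]

theorem get_correct_canvas_positions_spec : Claim_equal_get_correct_canvas_positions := by
  intro alignment _
  unfold Spec_get_correct_canvas_positions get_correct_canvas_positions get_correct_canvas_positions_alt
  rw [gccp_A_loop, gccp_cnt_fold]
  have := gccp_B_loop alignment 0 []
  simp only [zero_add] at this ⊢
  rw [this]
  simp
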